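-- pv_equiv track=rewrite | github.com/HexRoy/Python-Coding-Challenge-Problems | DCP 23 Total Set Bits.py | total_set_bits
-- ===== SOURCE A (Python) =====
-- def total_set_bits(n):
--     """
--     total_set_bits: Finds the total number of set bits between 1 - n (1 and n inclusive)
--     :param n: (Int) the upper limit we will find the set bits for
--     :return: (Int)  Total number of set bits
--     """
--     set_bits = 0
--
--     if n < 1:
--         exit(1)
--
--     if n == 1:
--         return 1
--
--     for i in range(1, n+1):
--         binary = bin(i).replace('0b', '')
--         for j in range(len(binary)):
--             if binary[j] == '1':
--                 set_bits += 1
--     return set_bits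
-- ===== SOURCE B (Python) =====
-- def total_set_bits(n):
--     # Per-bit closed form: for bit k, numbers in [0, n] with bit k set come in
--     # full blocks of 2**k per 2**(k+1), plus a partial block at the end.
--     total = 0
--     k = 0
--     while (1 << k) <= n:
--         p = 1 << k
--         block = p << 1
--         total += ((n + 1) // block) * p + max(0, (n + 1) % block - p)
--         k += 1
--     return total
-- ===== Notes on version B (the rewrite author's own statement) =====
-- stated objective: faster
-- what changed: Replaced the per-number loop that builds each binary string and counts its '1' characters with a closed-form per-bit count (full blocks of 2^k per 2^(k+1) plus a partial block), one term per bit.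
import Mathlib
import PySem

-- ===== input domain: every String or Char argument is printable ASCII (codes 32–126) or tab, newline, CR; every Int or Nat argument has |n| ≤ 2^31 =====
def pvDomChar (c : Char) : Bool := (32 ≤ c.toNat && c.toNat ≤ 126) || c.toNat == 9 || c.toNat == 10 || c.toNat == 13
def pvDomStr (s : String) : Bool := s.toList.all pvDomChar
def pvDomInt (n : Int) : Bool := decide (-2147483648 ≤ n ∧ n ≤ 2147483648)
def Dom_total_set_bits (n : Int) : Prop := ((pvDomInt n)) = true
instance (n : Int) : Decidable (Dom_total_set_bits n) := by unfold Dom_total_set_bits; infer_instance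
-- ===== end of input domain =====

-- B replaces A's per-number binary-string building and character counting by a
-- closed-form per-bit count (one term per bit position), an asymptotically faster algorithm.

-- ===== PORT A =====
-- bin(i).replace('0b','') for i ≥ 1: the binary digit characters of i, most significant first
def binStr (m : Nat) : List Char :=
  if m = 0 then [] else binStr (m / 2) ++ [if m % 2 == 1 then '1' else '0']
decreasing_by exact Nat.div_lt_self (Nat.pos_of_ne_zero (by assumption)) (by norm_num)

def total_set_bits (n : Int) : Int :=
  -- n < 1: Python calls exit(1) (SystemExit raised); excluded by Pre_, port returns 0 there
  if n < 1 then 0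
  else if n == 1 then 1
  else
    -- for i in range(1, n+1): for j in range(len(binary)): if binary[j] == '1': set_bits += 1
    (PySem.List.pyRange 1 (n + 1) 1).foldl
      (fun acc i => (binStr i.toNat).foldl (fun a c => if c == '1' then a + 1 else a) acc) 0

-- ===== PORT B =====
-- while (1 << k) <= n: total += ((n+1)//(p*2))*p + max(0, (n+1) % (p*2) - p); k += 1
def altLoop (n : Int) (total : Int) (k : Nat) : Int :=
  if h : (2 : Int) ^ k ≤ n then
    altLoop n
      (total + PySem.Int.floordiv (n + 1) (2 ^ k * 2) * 2 ^ k +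
        max 0 (PySem.Int.mod (n + 1) (2 ^ k * 2) - 2 ^ k))
      (k + 1)
  else total
termination_by (n + 1 - 2 ^ k).toNat
decreasing_by
  have h1 : (1 : Int) ≤ 2 ^ k := one_le_pow₀ (by norm_num)
  omega

def total_set_bits_alt (n : Int) : Int := altLoop n 0 0

-- ===== PRECONDITION & SPEC =====
-- Pre_ excludes n < 1, where the Python A raises SystemExit via exit(1)
def Pre_total_set_bits (n : Int) : Prop := 1 ≤ n
instance (n : Int) : Decidable (Pre_total_set_bits n) := by unfold Pre_total_set_bits; infer_instance
def pvWitness_total_set_bits : Int := 5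

def Spec_total_set_bits (n : Int) (out : Int) : Prop := out = total_set_bits_alt n
instance (n : Int) (out : Int) : Decidable (Spec_total_set_bits n out) := by unfold Spec_total_set_bits; infer_instance

-- ===== CLAIM (what is proved, stated in full; the proofs are below) =====
def Claim_equal_total_set_bits : Prop := ∀ (n : Int), Dom_total_set_bits n → Pre_total_set_bits n → Spec_total_set_bits n (total_set_bits n)

-- ===== LEMMAS AND PROOFS =====

-- popcount, the number of '1' digits of m
def pc (m : Nat) : Nat :=
  if m = 0 then 0 else pc (m / 2) + m % 2
decreasing_by exact Nat.div_lt_self (Nat.pos_of_ne_zero (by assumption)) (by norm_num)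

-- closed-form count of numbers in [0, m] with bit k set (Nat level)
def g (m k : Nat) : Nat := (m + 1) / 2 ^ (k + 1) * 2 ^ k + ((m + 1) % 2 ^ (k + 1) - 2 ^ k)

-- A's running sum, Nat level
def SA (m : Nat) : Nat := ∑ i ∈ Finset.range m, pc (i + 1)

lemma binStr_foldl (m : Nat) (acc : Int) :
    (binStr m).foldl (fun a c => if c == '1' then a + 1 else a) acc = acc + pc m := by
  induction m using Nat.strong_induction_on generalizing acc with
  | _ m ih =>
    rw [binStr, pc]
    by_cases h : m = 0
    · simp [h]
    · simp only [h, if_false]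
      rw [List.foldl_append, ih (m / 2) (Nat.div_lt_self (Nat.pos_of_ne_zero h) (by norm_num))]
      rcases Nat.mod_two_eq_zero_or_one m with h2 | h2
      · simp [h2]
      · simp [h2]; ring

lemma A_foldl (m : Nat) :
    (PySem.List.pyRange 1 ((m : Int) + 1) 1).foldl
      (fun acc i => (binStr i.toNat).foldl (fun a c => if c == '1' then a + 1 else a) acc) 0
      = (SA m : Int) := by
  induction m with
  | zero => simp [SA, PySem.List.pyRange_one_eq_nil]
  | succ m ih =>
    have h : ((m : Int) + 1) + 1 = ((m + 1 : Nat) : Int) + 1 := by push_cast; ring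
    rw [← h, PySem.List.pyRange_one_succ_right (by omega), List.foldl_append]
    simp only [List.foldl_cons, List.foldl_nil, ih]
    rw [binStr_foldl]
    have : ((m : Int) + 1).toNat = m + 1 := by omega
    rw [this]
    simp [SA, Finset.sum_range_succ]

lemma g_zero_of_lt {m k : Nat} (h : m < 2 ^ k) : g m k = 0 := by
  have h1 : (1 : Nat) ≤ 2 ^ k := Nat.one_le_two_pow
  have h2 : (2 : Nat) ^ (k + 1) = 2 ^ k * 2 := by ring
  have hd : (m + 1) / 2 ^ (k + 1) = 0 := Nat.div_eq_of_lt (by omega)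
  have hm : (m + 1) % 2 ^ (k + 1) = m + 1 := Nat.mod_eq_of_lt (by omega)
  simp [g, hd, hm]
  omega

lemma gstep (p m : Nat) (hp : 0 < p) :
    (m + 2) / (p * 2) * p + ((m + 2) % (p * 2) - p)
      = (m + 1) / (p * 2) * p + ((m + 1) % (p * 2) - p) + (m + 1) / p % 2 := by
  set a := (m + 1) / (p * 2) with ha
  set r := (m + 1) % (p * 2) with hr
  have hmr : p * 2 * a + r = m + 1 := Nat.div_add_mod _ _
  have hrlt : r < p * 2 := Nat.mod_lt _ (by omega)
  have hassoc : p * 2 * a = p * (2 * a) := by ring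
  have hdivp : (m + 1) / p = 2 * a + r / p := by
    rw [← hmr, hassoc, Nat.mul_add_div hp]
  have hrp2 : r / p < 2 := Nat.div_lt_of_lt_mul (by omega)
  have hbit : (m + 1) / p % 2 = r / p := by
    rw [hdivp, Nat.mul_add_mod]
    exact Nat.mod_eq_of_lt hrp2
  by_cases hc : r + 1 = p * 2
  · have hq : m + 2 = p * 2 * (a + 1) := by
      have : p * 2 * (a + 1) = p * 2 * a + p * 2 := by ring
      omega
    have hd2 : (m + 2) / (p * 2) = a + 1 := by rw [hq, Nat.mul_div_cancel_left _ (by omega)]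
    have hm2 : (m + 2) % (p * 2) = 0 := by rw [hq, Nat.mul_mod_right]
    have hrp : r / p = 1 := by
      have h1 : 1 ≤ r / p := (Nat.one_le_div_iff hp).mpr (by omega)
      omega
    rw [hd2, hm2, hbit, hrp]
    have hmul : (a + 1) * p = a * p + p := by ring
    omega
  · have hq : m + 2 = p * 2 * a + (r + 1) := by omega
    have hd2 : (m + 2) / (p * 2) = a := by
      rw [hq, Nat.mul_add_div (by omega), Nat.div_eq_of_lt (by omega)]
      omega
    have hm2 : (m + 2) % (p * 2) = r + 1 := by
      rw [hq, Nat.mul_add_mod, Nat.mod_eq_of_lt (by omega)]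
    rw [hd2, hm2, hbit]
    by_cases hrpc : r < p
    · have hrp : r / p = 0 := Nat.div_eq_of_lt hrpc
      rw [hrp]; omega
    · have hrp : r / p = 1 := by
        have h1 : 1 ≤ r / p := (Nat.one_le_div_iff hp).mpr (by omega)
        omega
      rw [hrp]; omega

lemma g_succ (m k : Nat) : g (m + 1) k = g m k + (m + 1) / 2 ^ k % 2 := by
  unfold g
  have h2 : (2 : Nat) ^ (k + 1) = 2 ^ k * 2 := by ring
  rw [h2]
  exact gstep (2 ^ k) m (Nat.two_pow_pos k)

lemma pc_eq_bits (K : Nat) : ∀ m : Nat, m < 2 ^ K → pc m = ∑ k ∈ Finset.range K, m / 2 ^ k % 2 := by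
  induction K with
  | zero =>
    intro m hm
    interval_cases m
    simp [pc]
  | succ K ih =>
    intro m hm
    rw [Finset.sum_range_succ']
    have hstep : ∀ k, m / 2 ^ (k + 1) % 2 = (m / 2) / 2 ^ k % 2 := by
      intro k
      rw [Nat.div_div_eq_div_mul]
      congr 2
      ring
    rw [Finset.sum_congr rfl (fun k _ => hstep k)]
    have hm2 : m / 2 < 2 ^ K := by
      have : (2 : Nat) ^ (K + 1) = 2 * 2 ^ K := by ring
      omega
    rw [← ih (m / 2) hm2, pc]
    by_cases h : m = 0
    · simp [h, pc]
    · simp [h]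

lemma SA_eq (m : Nat) (hm : m ≤ 2 ^ 31) : SA m = ∑ k ∈ Finset.range 32, g m k := by
  induction m with
  | zero =>
    rw [SA, Finset.sum_eq_zero fun k _ => g_zero_of_lt (m := 0) (Nat.two_pow_pos _)]
    simp
  | succ m ih =>
    have hm' : m ≤ 2 ^ 31 := by omega
    rw [SA, Finset.sum_range_succ, ← SA, ih hm']
    have : ∀ k ∈ Finset.range 32, g (m + 1) k = g m k + (m + 1) / 2 ^ k % 2 :=
      fun k _ => g_succ m k
    rw [Finset.sum_congr rfl this, Finset.sum_add_distrib]
    have hpc := pc_eq_bits 32 (m + 1) (by norm_num at hm ⊢; omega)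
    omega

lemma altLoop_eq : ∀ (j k : Nat) (t : Int) (m : Nat), k + j = 32 → m ≤ 2 ^ 31 →
    altLoop (m : Int) t k = t + ((∑ i ∈ Finset.Ico k 32, g m i : Nat) : Int) := by
  intro j
  induction j with
  | zero =>
    intro k t m hk hm
    have hk32 : k = 32 := by omega
    subst hk32
    have hlt : ¬ ((2 : Int) ^ 32 ≤ (m : Int)) := by
      have h31 : (m : Int) ≤ 2 ^ 31 := by exact_mod_cast hm
      norm_num at h31 ⊢
      omega
    rw [altLoop, dif_neg hlt, Finset.Ico_self, Finset.sum_empty]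
    simp
  | succ j ih =>
    intro k t m hk hm
    have hk32 : k < 32 := by omega
    rw [altLoop]
    have hcast : (2 : Int) ^ k = ((2 ^ k : Nat) : Int) := by push_cast; ring
    by_cases h : (2 : Int) ^ k ≤ (m : Int)
    · have hkm : 2 ^ k ≤ m := by rw [hcast] at h; exact_mod_cast h
      rw [dif_pos h]
      rw [ih (k + 1) _ m (by omega) hm]
      have hterm :
          PySem.Int.floordiv ((m : Int) + 1) (2 ^ k * 2) * 2 ^ k +
            max 0 (PySem.Int.mod ((m : Int) + 1) (2 ^ k * 2) - 2 ^ k)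
          = ((g m k : Nat) : Int) := by
        have h1 : ((m : Int) + 1) = ((m + 1 : Nat) : Int) := by push_cast; ring
        have h2 : (2 : Int) ^ k * 2 = ((2 ^ (k + 1) : Nat) : Int) := by push_cast; ring
        rw [h1, h2, PySem.Int.floordiv_natCast, PySem.Int.mod_natCast, hcast]
        unfold g
        rw [Nat.cast_add, Nat.cast_mul]
        omega
      have hsum : (∑ i ∈ Finset.Ico k 32, g m i) = g m k + ∑ i ∈ Finset.Ico (k + 1) 32, g m i := by
        rw [Finset.sum_eq_sum_Ico_succ_bot hk32]
      rw [hsum, Nat.cast_add, ← hterm]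
      ring
    · rw [dif_neg h]
      have hkm : m < 2 ^ k := by
        rw [hcast] at h
        have : ¬ (2 ^ k ≤ m) := fun hc => h (by exact_mod_cast hc)
        omega
      have hz : (∑ i ∈ Finset.Ico k 32, g m i) = 0 := by
        apply Finset.sum_eq_zero
        intro i hi
        have hki : k ≤ i := (Finset.mem_Ico.mp hi).1
        exact g_zero_of_lt (lt_of_lt_of_le hkm (Nat.pow_le_pow_right (by norm_num) hki))
      rw [hz]
      simp

-- ===== VERDICT (by name: the statement is the Claim_ definition above) =====
theorem total_set_bits_spec : Claim_equal_total_set_bits := by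
  intro n hdom hpre
  unfold Spec_total_set_bits
  have hpre' : (1 : Int) ≤ n := hpre
  have hdom' : n ≤ 2147483648 := by
    unfold Dom_total_set_bits pvDomInt at hdom
    simpa using (of_decide_eq_true hdom).2
  obtain ⟨m, rfl⟩ : ∃ m : Nat, n = (m : Int) := ⟨n.toNat, by omega⟩
  have hm1 : 1 ≤ m := by exact_mod_cast hpre'
  have hm31 : m ≤ 2 ^ 31 := by norm_num; exact_mod_cast hdom'
  -- B side
  have hB : total_set_bits_alt (m : Int) = ((∑ k ∈ Finset.range 32, g m k : Nat) : Int) := by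
    rw [total_set_bits_alt, altLoop_eq 32 0 0 m (by norm_num) hm31, ← Finset.range_eq_Ico]
    ring
  -- A side
  have hpc0 : pc 0 = 0 := by rw [pc]; norm_num
  have hpc1 : pc 1 = 1 := by rw [pc]; norm_num [hpc0]
  have hA : total_set_bits (m : Int) = (SA m : Int) := by
    rw [total_set_bits]
    have h1 : ¬ ((m : Int) < 1) := by exact_mod_cast not_lt.mpr hpre'
    simp only [h1, if_false]
    by_cases he : m = 1
    · subst he
      norm_num [SA, Finset.sum_range_one, hpc1]
    · have hbe : ((m : Int) == 1) = false := beq_eq_false_iff_ne.mpr (by simpa using he)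
      rw [hbe, if_neg (by simp)]
      exact A_foldl m
  rw [hA, hB, SA_eq m hm31]
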